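-- pv_equiv track=rewrite | github.com/HAPPY-CHANDRU-RAJU/dsa-python | max_of_min_window_size.py | maxMinWindow
-- ===== SOURCE A (Python) =====
-- def maxMinWindow(arr, n):
--     result = []
--     for gap in range(1, n+1):
--         max_window = -float('inf')
--         for i in range(0, n-gap+1):
--             max_window = max(max_window, min(arr[i:i+gap]))
--         result.append(max_window)
--     return result
-- ===== SOURCE B (Python) =====
-- def maxMinWindow(arr, n):
--     # DP: window minima of size g are obtained from those of size g-1 by a
--     # zip-min with the shifted array, so each answer is a max over one row.
--     if n <= 0:
--         return []
--     a = arr[:n]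
--     row = a  # minima of all windows of size 1
--     result = [max(row)]
--     for g in range(2, n + 1):
--         row = [min(x, y) for x, y in zip(row, a[g - 1:])]
--         result.append(max(row))
--     return result
-- ===== Notes on version B (the rewrite author's own statement) =====
-- stated objective: faster
-- what changed: Replaces the O(gap) min-scan of every window at every size (O(n^3)) by a dynamic program that derives the row of window minima of size g from the row of size g-1 via a single zip-min with the shifted array, taking one max per row (O(n^2)).
import Mathlib
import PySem

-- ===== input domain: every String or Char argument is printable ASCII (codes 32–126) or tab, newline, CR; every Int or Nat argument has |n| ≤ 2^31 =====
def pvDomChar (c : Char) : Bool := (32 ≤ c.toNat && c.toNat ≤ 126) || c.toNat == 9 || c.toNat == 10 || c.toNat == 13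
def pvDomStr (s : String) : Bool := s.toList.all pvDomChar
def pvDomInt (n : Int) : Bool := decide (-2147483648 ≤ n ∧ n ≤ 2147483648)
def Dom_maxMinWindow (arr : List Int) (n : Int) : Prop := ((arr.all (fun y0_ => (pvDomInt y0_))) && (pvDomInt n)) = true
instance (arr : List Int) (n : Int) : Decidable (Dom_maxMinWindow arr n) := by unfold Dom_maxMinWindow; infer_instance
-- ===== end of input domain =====

-- B replaces A's per-window min scans (O(n^3)) by a row-to-row zip-min dynamic program over window sizes (O(n^2)); same return values.


-- ===== PORT A =====
def maxMinWindow (arr : List Int) (n : Int) : List Int :=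
  (PySem.List.pyRange 1 (n + 1) 1).foldl (fun result gap =>
    let mw : Option Int :=
      (PySem.List.pyRange 0 (n - gap + 1) 1).foldl (fun mx i =>
        -- min(arr[i:i+gap]); Python raises ValueError on an empty slice (Pre_ excludes exactly those inputs)
        match PySem.List.min? (PySem.List.slice arr (some i) (some (i + gap))) (fun y => y) with
        | some v => some (match mx with | none => v | some x => max x v)  -- max(-inf, v) = v
        | none => mx) (none : Option Int)
    -- 'none' models -float('inf'); for every gap in range(1, n+1) the inner loop is nonempty, so the default is never the result under Pre_
    result ++ [mw.getD 0]) []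

-- ===== PORT B =====
def maxMinWindow_alt (arr : List Int) (n : Int) : List Int :=
  if n ≤ 0 then []
  else
    let a := PySem.List.slice arr none (some n)         -- arr[:n]
    let row0 := a
    let res0 := [(PySem.List.max? row0 (fun y => y)).getD 0]   -- max(row); row nonempty under Pre_
    ((PySem.List.pyRange 2 (n + 1) 1).foldl
      (fun (st : List Int × List Int) g =>
        let row := List.zipWith (fun x y => min x y) st.1
                     (PySem.List.slice a (some (g - 1)) none)  -- zip(row, a[g-1:]) with min
        (row, st.2 ++ [(PySem.List.max? row (fun y => y)).getD 0]))
      (row0, res0)).2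

-- ===== PRECONDITION & SPEC =====
-- Pre_ excludes exactly the inputs on which A raises: when n > len(arr), min() hits an empty slice (ValueError).
def Pre_maxMinWindow (arr : List Int) (n : Int) : Prop := n ≤ (arr.length : Int)
instance (arr : List Int) (n : Int) : Decidable (Pre_maxMinWindow arr n) := by
  unfold Pre_maxMinWindow; infer_instance
def pvWitness_maxMinWindow : List Int × Int := ([3, 1, 2], 3)
def Spec_maxMinWindow (arr : List Int) (n : Int) (out : List Int) : Prop := out = maxMinWindow_alt arr n
instance (arr : List Int) (n : Int) (out : List Int) : Decidable (Spec_maxMinWindow arr n out) := by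
  unfold Spec_maxMinWindow; infer_instance

-- ===== CLAIM (what is proved, stated in full; the proofs are below) =====
def Claim_equal_maxMinWindow : Prop := ∀ (arr : List Int) (n : Int), Dom_maxMinWindow arr n → Pre_maxMinWindow arr n → Spec_maxMinWindow arr n (maxMinWindow arr n)

-- ===== LEMMAS AND PROOFS =====

def minNE (l : List Int) : Int := match l with | [] => 0 | x :: t => t.foldl min x
def maxNE (l : List Int) : Int := match l with | [] => 0 | x :: t => t.foldl max x

def rowR (a : List Int) (g : Nat) : List Int :=
  (List.range (a.length + 1 - g)).map (fun i => minNE ((a.drop i).take g))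

lemma minNE_append_singleton (l : List Int) (y : Int) (h : l ≠ []) :
    minNE (l ++ [y]) = min (minNE l) y := by
  cases l with
  | nil => simp at h
  | cons x t => simp [minNE, List.foldl_append]

lemma maxNE_getD (l : List Int) :
    (PySem.List.max? l (fun y => y)).getD 0 = maxNE l := by
  cases l with
  | nil => rfl
  | cons x t => rw [PySem.List.max?_id_cons]; simp [maxNE]

lemma rowR_one (a : List Int) : rowR a 1 = a := by
  apply List.ext_getElem
  · simp [rowR]
  · intro i h1 h2
    simp only [rowR, List.getElem_map, List.getElem_range]
    have ht : List.take 1 (List.drop i a) = [a[i]] := by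
      rw [List.drop_eq_getElem_cons h2]; rfl
    rw [ht]; simp [minNE]

lemma rowR_step (a : List Int) (g : Nat) (hg : 1 ≤ g) :
    List.zipWith (fun x y => min x y) (rowR a g) (a.drop g) = rowR a (g + 1) := by
  apply List.ext_getElem
  · simp [rowR]; omega
  · intro i h1 h2
    have hlen : i < a.length - g := by simp [rowR] at h1; omega
    simp only [List.getElem_zipWith, rowR, List.getElem_map, List.getElem_range,
      List.getElem_drop]
    rw [List.take_add_one]
    have hg' : g < (a.drop i).length := by simp; omega
    rw [List.getElem?_eq_getElem hg']
    simp only [Option.toList_some]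
    rw [minNE_append_singleton _ _ (by
      have hlt : ((a.drop i).take g).length = g := by simp; omega
      intro hnil; rw [hnil] at hlt; simp at hlt; omega)]
    have hc : g + i = i + g := Nat.add_comm g i
    simp [List.getElem_drop, hc]

lemma foldl_omax_some (v : Nat → Int) (js : List Nat) (x : Int) :
    js.foldl (fun mx k => some (match mx with | none => v k | some y => max y (v k))) (some x)
      = some ((js.map v).foldl max x) := by
  induction js generalizing x with
  | nil => rfl
  | cons j t ih => simpa using ih (max x (v j))

lemma window_eq (arr : List Int) (m x g : Nat) (h : x + g ≤ m) :
    ((arr.take m).drop x).take g = (arr.drop x).take g := by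
  rw [List.drop_take, List.take_take]
  congr 1
  omega

lemma innerA (arr : List Int) (m gap : Nat) (hm : m ≤ arr.length)
    (hg1 : 1 ≤ gap) (hgm : gap ≤ m) :
    (PySem.List.pyRange 0 ((m : Int) - (gap : Int) + 1) 1).foldl
      (fun mx i =>
        match PySem.List.min? (PySem.List.slice arr (some i) (some (i + (gap : Int)))) (fun y => y) with
        | some v => some (match mx with | none => v | some x => max x v)
        | none => mx) (none : Option Int)
    = some (maxNE (rowR (arr.take m) gap)) := by
  have hK : (m : Int) - (gap : Int) + 1 = ((m - gap + 1 : Nat) : Int) := by omega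
  rw [hK, PySem.List.pyRange_one]
  have hK2 : (((m - gap + 1 : Nat) : Int) - 0).toNat = m - gap + 1 := by omega
  rw [hK2, List.foldl_map]
  rw [PySem.List.foldl_congr_mem _ _
    (fun (mx : Option Int) (k : Nat) =>
      some (match mx with
            | none => minNE (((arr.take m).drop k).take gap)
            | some y => max y (minNE (((arr.take m).drop k).take gap)))) _ ?_]
  · -- pure fold over range (m-gap+1)
    have hsplit : m - gap + 1 = (m - gap) + 1 := rfl
    rw [hsplit, List.range_succ_eq_map, List.foldl_cons, List.foldl_map]
    have := foldl_omax_some (fun k => minNE (((arr.take m).drop (Nat.succ k)).take gap))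
      (List.range (m - gap)) (minNE (((arr.take m).drop 0).take gap))
    simp only [Nat.succ_eq_add_one] at this ⊢
    rw [this]
    congr 1
    -- maxNE (rowR a gap) = foldl max over the row
    have hlen : (arr.take m).length = m := by simp; omega
    rw [rowR, hlen]
    have : m + 1 - gap = (m - gap) + 1 := by omega
    rw [this, List.range_succ_eq_map, List.map_cons, List.map_map]
    simp [maxNE, List.foldl_map, Nat.succ_eq_add_one]
  · intro acc x hx
    simp only [List.mem_range] at hx
    have hxg : x + gap ≤ m := by omega
    have hslice : PySem.List.slice arr (some (0 + (x : Int))) (some (0 + (x : Int) + (gap : Int)))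
        = ((arr.take m).drop x).take gap := by
      rw [zero_add, PySem.List.slice_natCast_add, window_eq arr m x gap hxg]
    have hne : ((arr.take m).drop x).take gap ≠ [] := by
      have hl : (((arr.take m).drop x).take gap).length = gap := by simp; omega
      intro hnil; rw [hnil] at hl; simp at hl; omega
    obtain ⟨c, t, hct⟩ := List.exists_cons_of_ne_nil hne
    rw [hslice, hct, PySem.List.min?_id_cons]
    have h2 : List.foldl min c t = minNE (c :: t) := rfl
    rw [h2]
    simp only [hct]

lemma Bfold (a : List Int) (t : Nat) :
    ∀ (g : Nat) (R : List Int), 1 ≤ g →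
    (PySem.List.pyRange ((g : Int) + 1) ((g : Int) + 1 + (t : Int)) 1).foldl
      (fun (st : List Int × List Int) gi =>
        (List.zipWith (fun x y => min x y) st.1 (PySem.List.slice a (some (gi - 1)) none),
         st.2 ++ [(PySem.List.max? (List.zipWith (fun x y => min x y) st.1
            (PySem.List.slice a (some (gi - 1)) none)) (fun y => y)).getD 0]))
      (rowR a g, R)
    = (rowR a (g + t), R ++ (List.range t).map (fun k => maxNE (rowR a (g + 1 + k)))) := by
  induction t with
  | zero =>
    intro g R hg
    rw [PySem.List.pyRange_one_eq_nil (by omega)]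
    simp
  | succ t ih =>
    intro g R hg
    rw [PySem.List.pyRange_one_cons (by omega), List.foldl_cons]
    simp only []
    have hrow : List.zipWith (fun x y => min x y) (rowR a g)
        (PySem.List.slice a (some ((g : Int) + 1 - 1)) none) = rowR a (g + 1) := by
      have h1 : (g : Int) + 1 - 1 = ((g : Nat) : Int) := by omega
      rw [h1, PySem.List.slice_from_natCast, rowR_step a g hg]
    rw [hrow, maxNE_getD]
    have hrange : PySem.List.pyRange ((g : Int) + 1 + 1) ((g : Int) + 1 + ((t : Nat) + 1 : Nat)) 1
        = PySem.List.pyRange (((g + 1 : Nat) : Int) + 1) (((g + 1 : Nat) : Int) + 1 + (t : Int)) 1 := by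
      congr 1 <;> (push_cast; ring)
    rw [hrange, ih (g + 1) (R ++ [maxNE (rowR a (g + 1))]) (by omega)]
    refine Prod.ext ?_ ?_
    · show rowR a (g + 1 + t) = rowR a (g + (t + 1))
      congr 1
      omega
    · show (R ++ [maxNE (rowR a (g + 1))]) ++ _ = R ++ _
      rw [List.range_succ_eq_map, List.map_cons, List.map_map, ← List.append_cons]
      simp only [Nat.add_zero]
      congr 1
      congr 1
      apply List.map_congr_left
      intro k _
      simp only [Function.comp_apply, Nat.succ_eq_add_one]
      have : g + 1 + 1 + k = g + 1 + (k + 1) := by omega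
      rw [this]

theorem maxMinWindow_eq_alt (arr : List Int) (n : Int) (hpre : n ≤ (arr.length : Int)) :
    maxMinWindow arr n = maxMinWindow_alt arr n := by
  by_cases hn : n ≤ 0
  · rw [maxMinWindow, maxMinWindow_alt]
    rw [PySem.List.pyRange_one_eq_nil (by omega)]
    simp [hn]
  · have hn : 0 < n := by omega
    set m : Nat := n.toNat with hmdef
    have hmn : (m : Int) = n := by omega
    have hm : m ≤ arr.length := by omega
    have hm1 : 1 ≤ m := by omega
    set a : List Int := arr.take m with hadef
    -- A side
    have hA : maxMinWindow arr n
        = (List.range m).map (fun k => maxNE (rowR a (k + 1))) := by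
      rw [maxMinWindow]
      rw [PySem.List.foldl_congr_mem _ _
        (fun (result : List Int) (gap : Int) =>
          result ++ [((PySem.List.pyRange 0 (n - gap + 1) 1).foldl (fun mx i =>
            match PySem.List.min? (PySem.List.slice arr (some i) (some (i + gap))) (fun y => y) with
            | some v => some (match mx with | none => v | some x => max x v)
            | none => mx) (none : Option Int)).getD 0]) _ (by intro acc x _; rfl)]
      rw [PySem.List.foldl_append_singleton_eq_map]
      rw [List.nil_append]
      rw [← hmn, PySem.List.pyRange_one]
      have h1 : (((m : Int) + 1) - 1).toNat = m := by omega
      rw [h1, List.map_map]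
      apply List.map_congr_left
      intro k hk
      simp only [List.mem_range] at hk
      simp only [Function.comp_apply]
      have hcast : (1 : Int) + (k : Nat) = (((k + 1 : Nat) : Int)) := by push_cast; ring
      rw [hcast]
      have hinner := innerA arr m (k + 1) hm (by omega) (by omega)
      rw [hadef, hinner, Option.getD_some]
    -- B side
    have hB : maxMinWindow_alt arr n
        = (List.range m).map (fun k => maxNE (rowR a (k + 1))) := by
      rw [maxMinWindow_alt, if_neg (by omega)]
      have hslice : PySem.List.slice arr none (some n) = a := by
        rw [PySem.List.slice_to arr (by omega)]
      simp only [hslice]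
      have hinit : (a, [(PySem.List.max? a (fun y => y)).getD 0])
          = (rowR a 1, [(PySem.List.max? (rowR a 1) (fun y => y)).getD 0]) := by
        rw [rowR_one]
      rw [hinit]
      have hrange2 : PySem.List.pyRange 2 (n + 1) 1
          = PySem.List.pyRange (((1 : Nat) : Int) + 1) (((1 : Nat) : Int) + 1 + ((m - 1 : Nat) : Int)) 1 := by
        congr 1 <;> omega
      rw [hrange2, Bfold a (m - 1) 1 [(PySem.List.max? (rowR a 1) (fun y => y)).getD 0] (by omega)]
      simp only [maxNE_getD]
      rw [show m = (m - 1) + 1 by omega, List.range_succ_eq_map, List.map_cons, List.map_map]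
      simp only [Nat.add_sub_cancel, List.append_nil, List.singleton_append, Nat.zero_add]
      congr 1
      apply List.map_congr_left
      intro k _
      simp only [Function.comp_apply, Nat.succ_eq_add_one]
      rw [show 1 + 1 + k = k + 1 + 1 from by omega]
    rw [hA, hB]

-- ===== VERDICT (by name: the statement is the Claim_ definition above) =====
theorem maxMinWindow_spec : Claim_equal_maxMinWindow := by
  intro arr n _ hpre
  unfold Pre_maxMinWindow at hpre
  unfold Spec_maxMinWindow
  exact maxMinWindow_eq_alt arr n hpre
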